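-- pv_equiv track=rewrite | github.com/iarko26/PyDSA | exactly three divisors.py | Threediv
-- ===== SOURCE A (Python) =====
-- def isprime(n):
--     if n==1:
--         return False
--     if n==2 or n==3:
--         return True
--     if n%2==0 or n%3==0:
--         return False
--     i=5
--     while i*i<=n:
--         if n%i==0 or n%(i+2)==0:
--             return False
--         i+=6
--     return True
--
-- def Threediv(N):
--     c=0
--     i=2
--     while i*i<=N:
--         if isprime(i):
--             c+=1
--         i+=1
--     return c
-- ===== SOURCE B (Python) =====
-- def Threediv(N):
--     # Sieve of Eratosthenes up to isqrt(N): mark composite multiples in a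
--     # boolean table, then count the remaining primes.
--     if N < 4:
--         return 0
--     r = 1
--     while (r + 1) * (r + 1) <= N:
--         r += 1
--     prime = [True] * (r + 1)
--     p = 2
--     while p * p <= r:
--         for m in range(p * p, r + 1, p):
--             prime[m] = False
--         p += 1
--     return sum(prime[2:])
-- ===== Notes on version B (the rewrite author's own statement) =====
-- stated objective: faster
-- what changed: Replaces A's per-candidate 6k±1 trial division over all candidates up to sqrt(N) with a sieve of Eratosthenes over a boolean table up to isqrt(N), counting the unmarked entries.
import Mathlib
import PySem

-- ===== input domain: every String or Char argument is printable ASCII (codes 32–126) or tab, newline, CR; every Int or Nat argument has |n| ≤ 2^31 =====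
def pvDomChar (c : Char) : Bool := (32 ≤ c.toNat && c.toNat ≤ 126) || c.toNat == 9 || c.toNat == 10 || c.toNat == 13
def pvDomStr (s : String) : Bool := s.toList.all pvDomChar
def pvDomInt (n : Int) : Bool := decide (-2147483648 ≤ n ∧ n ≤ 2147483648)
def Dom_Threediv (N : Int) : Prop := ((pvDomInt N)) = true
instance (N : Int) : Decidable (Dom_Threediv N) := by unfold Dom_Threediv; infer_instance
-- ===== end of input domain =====

-- B replaces A's per-candidate 6k±1 trial division with a sieve of Eratosthenes up to
-- isqrt(N): a boolean table of multiples, then a sum (objective: a faster algorithm).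

-- ===== PORT A =====
-- 'while i*i<=n' trial loop of isprime; the '5 ≤ i' conjunct only makes the recursion
-- well-founded (the loop is always entered with i = 5 and i only grows).
def isprimeLoop (n i : Int) : Bool :=
  if h : i * i ≤ n ∧ 5 ≤ i then
    if PySem.Int.mod n i == 0 || PySem.Int.mod n (i + 2) == 0 then false
    else isprimeLoop n (i + 6)
  else true
termination_by (n + 1 - i).toNat
decreasing_by
  have hi : i ≤ i * i := by nlinarith [h.2]
  omega

def isprime (n : Int) : Bool :=
  if n == 1 then false
  else if n == 2 || n == 3 then true
  else if PySem.Int.mod n 2 == 0 || PySem.Int.mod n 3 == 0 then false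
  else isprimeLoop n 5

-- 'while i*i<=N' loop of Threediv; '2 ≤ i' is the totality guard (entered with i = 2).
def ThreedivLoop (N i c : Int) : Int :=
  if h : i * i ≤ N ∧ 2 ≤ i then
    ThreedivLoop N (i + 1) (if isprime i then c + 1 else c)
  else c
termination_by (N + 1 - i).toNat
decreasing_by
  have hi : i ≤ i * i := by nlinarith [h.2]
  omega

def Threediv (N : Int) : Int := ThreedivLoop N 2 0

-- ===== PORT B =====
-- 'while (r+1)*(r+1) <= N' loop; '1 ≤ r' is the totality guard (entered with r = 1).
def isqrtLoop (N r : Int) : Int :=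
  if h : (r + 1) * (r + 1) ≤ N ∧ 1 ≤ r then isqrtLoop N (r + 1) else r
termination_by (N - r).toNat
decreasing_by
  have hr : r + 1 ≤ (r + 1) * (r + 1) := by nlinarith [h.2]
  omega

-- 'while p*p <= r' loop; the inner 'for m in range(p*p, r+1, p): prime[m] = False' is the
-- foldl over the range (in-bounds assignment; m is always in range here); '2 ≤ p' is the
-- totality guard (entered with p = 2).
def sieveLoop (r p : Int) (prime : Array Bool) : Array Bool :=
  if h : p * p ≤ r ∧ 2 ≤ p then
    sieveLoop r (p + 1)
      ((PySem.List.pyRange (p * p) (r + 1) p).foldl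
        (fun a m => a.setIfInBounds m.toNat false) prime)
  else prime
termination_by (r + 1 - p).toNat
decreasing_by
  have hp : p ≤ p * p := by nlinarith [h.2]
  omega

-- prime = [True]*(r+1) is Array.replicate; sum(prime[2:]) is the counting foldl over the
-- dropped list.
def Threediv_alt (N : Int) : Int :=
  if N < 4 then 0
  else
    let r := isqrtLoop N 1
    let prime := sieveLoop r 2 (Array.replicate (r + 1).toNat true)
    (prime.toList.drop 2).foldl (fun s b => if b then s + 1 else s) 0

-- ===== PRECONDITION & SPEC =====
def Spec_Threediv (N : Int) (out : Int) : Prop := out = Threediv_alt N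
instance (N : Int) (out : Int) : Decidable (Spec_Threediv N out) := by unfold Spec_Threediv; infer_instance

-- ===== CLAIM (what is proved, stated in full; the proofs are below) =====
def Claim_equal_Threediv : Prop := ∀ (N : Int), Dom_Threediv N → Spec_Threediv N (Threediv N)

-- ===== LEMMAS AND PROOFS =====
theorem prime_iff_no_sqrt_divisor (n : Int) (hn : 2 ≤ n) :
    Nat.Prime n.toNat ↔ ∀ d : Int, 2 ≤ d → d * d ≤ n → ¬ d ∣ n := by
  have hn0 : (n.toNat : Int) = n := Int.toNat_of_nonneg (by omega)
  constructor
  · intro hp d hd2 hdd hdvd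
    have hd0 : (d.toNat : Int) = d := Int.toNat_of_nonneg (by omega)
    have : d.toNat ∣ n.toNat := by
      rw [← Int.natCast_dvd_natCast, hd0, hn0]; exact hdvd
    rcases (Nat.Prime.eq_one_or_self_of_dvd hp _ this) with h1 | h1
    · omega
    · have : d = n := by omega
      subst this; nlinarith
  · intro h
    by_contra hnp
    have hpf := Nat.minFac_prime (n := n.toNat) (by omega)
    have hdvd := Nat.minFac_dvd n.toNat
    have hsq := Nat.minFac_sq_le_self (n := n.toNat) (by omega) hnp
    refine h (n.toNat.minFac : Int) ?_ ?_ ?_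
    · exact_mod_cast hpf.two_le
    · have h1 : (n.toNat.minFac * n.toNat.minFac : Nat) ≤ n.toNat := by nlinarith
      calc ((n.toNat.minFac : Int) * n.toNat.minFac) = ((n.toNat.minFac * n.toNat.minFac : Nat) : Int) := by push_cast; ring
        _ ≤ (n.toNat : Int) := by exact_mod_cast h1
        _ = n := hn0
    · rw [← hn0]; exact_mod_cast hdvd

theorem not_prime_of_divisor (n d : Int) (hd2 : 2 ≤ d) (hdn : d < n) (hdvd : d ∣ n) :
    ¬ Nat.Prime n.toNat := by
  intro hp
  have hd0 : (d.toNat : Int) = d := Int.toNat_of_nonneg (by omega)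
  have hn0 : (n.toNat : Int) = n := Int.toNat_of_nonneg (by omega)
  have : d.toNat ∣ n.toNat := by
    rw [← Int.natCast_dvd_natCast, hd0, hn0]; exact hdvd
  rcases Nat.Prime.eq_one_or_self_of_dvd hp _ this with h1 | h1 <;> omega

theorem isprimeLoop_false_iff (n : Int) (i : Int) (hi : 5 ≤ i) :
    isprimeLoop n i = false ↔
      ∃ j : Int, (∃ k : Nat, j = i + 6 * k) ∧ j * j ≤ n ∧ (j ∣ n ∨ (j + 2) ∣ n) := by
  fun_induction isprimeLoop n i with
  | case1 h hg hx =>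
      simp only [true_iff]
      rcases Bool.or_eq_true_iff.mp hx with hx | hx
      · exact ⟨h, ⟨0, by push_cast; ring⟩, hg.1,
          Or.inl ((PySem.Int.mod_eq_zero_iff_dvd n h).mp (by simpa using hx))⟩
      · exact ⟨h, ⟨0, by push_cast; ring⟩, hg.1,
          Or.inr ((PySem.Int.mod_eq_zero_iff_dvd n (h + 2)).mp (by simpa using hx))⟩
  | case2 h hg hx ih =>
      have hnd1 : ¬ h ∣ n := by
        intro hd
        have := (PySem.Int.mod_eq_zero_iff_dvd n h).mpr hd
        simp [this] at hx
      have hnd2 : ¬ (h + 2) ∣ n := by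
        intro hd
        have := (PySem.Int.mod_eq_zero_iff_dvd n (h + 2)).mpr hd
        simp [this] at hx
      rw [ih (by omega)]
      constructor
      · rintro ⟨j, ⟨k, rfl⟩, hjj, hjd⟩
        exact ⟨h + 6 + 6 * k, ⟨k + 1, by push_cast; ring⟩, by linarith, hjd⟩
      · rintro ⟨j, ⟨k, rfl⟩, hjj, hjd⟩
        cases k with
        | zero =>
            push_cast at hjd
            simp only [mul_zero, add_zero] at hjd
            rcases hjd with hd | hd <;> [exact absurd hd hnd1; exact absurd hd hnd2]
        | succ k =>
            have he : h + 6 * ((k:Int) + 1) = h + 6 + 6 * k := by ring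
            push_cast at hjj hjd
            rw [he] at hjj hjd
            exact ⟨h + 6 + 6 * k, ⟨k, rfl⟩, hjj, hjd⟩
  | case3 h hg =>
      simp only [Bool.true_eq_false, false_iff]
      rintro ⟨j, ⟨k, rfl⟩, hjj, hjd⟩
      have : ¬ (h * h ≤ n) := by intro hh; exact hg ⟨hh, hi⟩
      have hk : (0:Int) ≤ 6 * k := by positivity
      nlinarith

theorem isprime_correct (n : Int) (hn : 2 ≤ n) :
    isprime n = decide (Nat.Prime n.toNat) := by
  have h1 : (n == 1) = false := by simp; omega
  by_cases h23 : n = 2 ∨ n = 3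
  · have hp : Nat.Prime n.toNat := by rcases h23 with rfl | rfl <;> decide
    simp [isprime, h1, hp]
    rcases h23 with rfl | rfl <;> simp
  · have h2 : (n == 2) = false := by simp; tauto
    have h3 : (n == 3) = false := by simp; tauto
    have hn4 : 4 ≤ n := by
      rcases (by omega : n = 2 ∨ n = 3 ∨ 4 ≤ n) with h | h | h <;> tauto
    rw [isprime, if_neg (by simp; omega), if_neg (by simp; tauto)]
    by_cases h6 : (2:Int) ∣ n ∨ (3:Int) ∣ n
    · have hc : (PySem.Int.mod n 2 == 0 || PySem.Int.mod n 3 == 0) = true := by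
        rcases h6 with h | h <;>
          simp [PySem.Int.mod_eq_zero_iff_dvd] <;> tauto
      rw [if_pos hc]
      have : ¬ Nat.Prime n.toNat := by
        rcases h6 with h | h
        · exact not_prime_of_divisor n 2 (by omega) (by omega) h
        · have h3n : n ≠ 3 := by tauto
          have : 3 < n := by
            rcases h with ⟨c, rfl⟩
            omega
          exact not_prime_of_divisor n 3 (by omega) this h
      simp [this]
    · push_neg at h6
      have hc : (PySem.Int.mod n 2 == 0 || PySem.Int.mod n 3 == 0) = false := by
        simp only [Bool.or_eq_false_iff, beq_eq_false_iff_ne, ne_eq]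
        constructor <;> intro hz
        · exact h6.1 ((PySem.Int.mod_eq_zero_iff_dvd n 2).mp hz)
        · exact h6.2 ((PySem.Int.mod_eq_zero_iff_dvd n 3).mp hz)
      rw [if_neg (by simp only [hc]; simp)]
      have hn5 : 5 ≤ n := by
        have : n ≠ 4 := fun h => h6.1 (by rw [h]; decide)
        omega
      rcases hb : isprimeLoop n 5 with _ | _
      · -- loop found a divisor: n not prime
        rcases (isprimeLoop_false_iff n 5 (by omega)).mp hb with ⟨j, ⟨k, rfl⟩, hjj, hjd⟩
        have hk : (0:Int) ≤ 6 * k := by positivity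
        have hnp : ¬ Nat.Prime n.toNat := by
          rcases hjd with hd | hd
          · exact not_prime_of_divisor n _ (by omega) (by nlinarith) hd
          · exact not_prime_of_divisor n _ (by omega) (by nlinarith) hd
        simp [hnp]
      · -- loop exhausted: n prime
        have hp : Nat.Prime n.toNat := by
          rw [prime_iff_no_sqrt_divisor n (by omega)]
          intro d hd2 hdd hdvd
          have hd2n : ¬ (2:Int) ∣ d := fun hc => h6.1 (hc.trans hdvd)
          have hd3n : ¬ (3:Int) ∣ d := fun hc => h6.2 (hc.trans hdvd)
          have hmod : d % 6 = 1 ∨ d % 6 = 5 := by omega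
          have hd5 : 5 ≤ d := by omega
          have hfalse : isprimeLoop n 5 = false := by
            rw [isprimeLoop_false_iff n 5 (by omega)]
            rcases hmod with hm | hm
            · refine ⟨d - 2, ⟨((d - 7) / 6).toNat, by omega⟩, by nlinarith, Or.inr (by simpa using hdvd)⟩
            · exact ⟨d, ⟨((d - 5) / 6).toNat, by omega⟩, hdd, Or.inl hdvd⟩
          rw [hb] at hfalse; exact absurd hfalse (by simp)
        simp [hp]

theorem ThreedivLoop_eq (N i c : Int) (hi : 2 ≤ i) (hN : 0 ≤ N) :
    ThreedivLoop N i c =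
      c + ((PySem.List.pyRange i ((Nat.sqrt N.toNat : Int) + 1) 1).countP (fun m => isprime m) : Int) := by
  fun_induction ThreedivLoop N i c with
  | case1 i c h ih =>
      have e1 : ((i.toNat : Int)) = i := Int.toNat_of_nonneg (by omega)
      have eN : ((N.toNat : Int)) = N := Int.toNat_of_nonneg hN
      have hle : i ≤ (Nat.sqrt N.toNat : Int) := by
        have h1 : i.toNat * i.toNat ≤ N.toNat := by
          have hx := h.1
          rw [← e1, ← eN] at hx
          exact_mod_cast hx
        have := Nat.le_sqrt.mpr h1
        omega
      rw [PySem.List.pyRange_one_cons (by omega), List.countP_cons]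
      have ih' := ih (by omega)
      rcases hb : isprime i with _ | _ <;> simp [hb] at ih' ⊢ <;> rw [ih'] <;> push_cast <;> ring
  | case2 i c h =>
      have hgt : (Nat.sqrt N.toNat : Int) + 1 ≤ i := by
        have hx : ¬ (i * i ≤ N) := fun hc => h ⟨hc, hi⟩
        have e1 : ((i.toNat : Int)) = i := Int.toNat_of_nonneg (by omega)
        have eN : ((N.toNat : Int)) = N := Int.toNat_of_nonneg hN
        have h1 : N.toNat < i.toNat * i.toNat := by
          have hx2 : N < i * i := by omega
          rw [← e1, ← eN] at hx2
          exact_mod_cast hx2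
        have := Nat.sqrt_lt.mpr h1
        omega
      rw [PySem.List.pyRange_one_eq_nil (by omega)]
      simp

theorem isqrtLoop_eq (N r : Int) (hr : 1 ≤ r) (hrr : r * r ≤ N) :
    isqrtLoop N r = (Nat.sqrt N.toNat : Int) := by
  fun_induction isqrtLoop N r with
  | case1 r h ih => exact ih (by omega) h.1
  | case2 r h =>
      have hN : 0 ≤ N := by nlinarith
      have e1 : ((r.toNat : Int)) = r := Int.toNat_of_nonneg (by omega)
      have eN : ((N.toNat : Int)) = N := Int.toNat_of_nonneg hN
      have h1 : r.toNat * r.toNat ≤ N.toNat := by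
        have h := hrr
        rw [← e1, ← eN] at h
        exact_mod_cast h
      have h2 : N.toNat < (r.toNat + 1) * (r.toNat + 1) := by
        have hlt : N < (r + 1) * (r + 1) := by
          by_contra hcc; exact h ⟨by omega, hr⟩
        rw [← e1, ← eN] at hlt
        exact_mod_cast hlt
      have hs1 : r.toNat ≤ Nat.sqrt N.toNat := Nat.le_sqrt.mpr h1
      have hs2 : Nat.sqrt N.toNat < r.toNat + 1 := Nat.sqrt_lt.mpr h2
      omega

theorem size_markFold (ms : List Int) (a : Array Bool) :
    (ms.foldl (fun a m => a.setIfInBounds m.toNat false) a).size = a.size := by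
  induction ms generalizing a with
  | nil => rfl
  | cons m ms ih => simp [List.foldl_cons, ih, Array.size_setIfInBounds]

theorem getD_markFold (ms : List Int) (h0 : ∀ m ∈ ms, 0 ≤ m) (a : Array Bool)
    (j : Nat) (hj : j < a.size) :
    (ms.foldl (fun a m => a.setIfInBounds m.toNat false) a).getD j false =
      if ((j : Int) ∈ ms) then false else a.getD j false := by
  induction ms generalizing a with
  | nil => simp
  | cons m ms ih =>
    simp only [List.foldl_cons]
    rw [ih (fun x hx => h0 x (List.mem_cons_of_mem _ hx)) _
      (by rw [Array.size_setIfInBounds]; exact hj)]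
    have hset : (a.setIfInBounds m.toNat false).getD j false =
        if m.toNat = j then false else a.getD j false := by
      have h1 : j < (a.setIfInBounds m.toNat false).size := by
        rw [Array.size_setIfInBounds]; exact hj
      simp only [Array.getD_eq_getD_getElem?]
      simp only [Array.getElem?_eq_getElem h1, Array.getElem?_eq_getElem hj]
      rw [Array.getElem_setIfInBounds hj]
      split_ifs <;> rfl
    rw [hset]
    have hm : 0 ≤ m := h0 m List.mem_cons_self
    by_cases hin : (j : Int) ∈ ms
    · simp [hin, List.mem_cons]
    · by_cases he : m.toNat = j
      · have hmj : m = (j : Int) := by omega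
        simp [hin, List.mem_cons, hmj, he]
      · have hmj : ¬ ((j : Int) = m) := by omega
        simp [hin, List.mem_cons, hmj, he]

theorem size_sieveLoop (r p : Int) (a : Array Bool) :
    (sieveLoop r p a).size = a.size := by
  fun_induction sieveLoop r p a with
  | case1 p a h ih => rw [ih, size_markFold]
  | case2 p a h => rfl

theorem getD_sieveLoop (r p : Int) (a : Array Bool) (hp : 2 ≤ p) (j : Nat) :
    ((sieveLoop r p a).getD j false = true ↔
      (a.getD j false = true ∧ ¬ ∃ q : Int, p ≤ q ∧ q * q ≤ r ∧ q ∣ (j : Int) ∧ q * q ≤ (j : Int) ∧ (j : Int) ≤ r)) := by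
  fun_induction sieveLoop r p a with
  | case1 p a h ih =>
    have hmem : ∀ y : Int, y ∈ PySem.List.pyRange (p * p) (r + 1) p ↔
        (p * p ≤ y ∧ y ≤ r ∧ p ∣ y) := by
      intro y
      rw [PySem.List.mem_pyRange_iff_of_pos (by omega)]
      constructor
      · rintro ⟨ha, hb, hc⟩
        refine ⟨ha, by omega, ?_⟩
        have h2 : p ∣ (y - p * p) + p * p := dvd_add hc ⟨p, rfl⟩
        simpa using h2
      · rintro ⟨ha, hb, hc⟩
        exact ⟨ha, by omega, dvd_sub hc ⟨p, rfl⟩⟩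
    have h0 : ∀ m ∈ PySem.List.pyRange (p * p) (r + 1) p, (0:Int) ≤ m := by
      intro m hm
      have := (hmem m).mp hm
      nlinarith [this.1, h.2]
    rw [ih (by omega)]
    by_cases hj : j < a.size
    case neg =>
      have hmark : (List.foldl (fun a m => a.setIfInBounds m.toNat false) a
          (PySem.List.pyRange (p * p) (r + 1) p)).getD j false = a.getD j false := by
        simp only [Array.getD_eq_getD_getElem?]
        rw [Array.getElem?_eq_none (by rw [size_markFold]; omega),
          Array.getElem?_eq_none (by omega)]
      have ha : a.getD j false = false := by
        rw [Array.getD_eq_getD_getElem?, Array.getElem?_eq_none (by omega)]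
        rfl
      rw [hmark, ha]
      simp
    case pos =>
    rw [getD_markFold _ h0 a j hj]
    constructor
    · rintro ⟨hset, hnex⟩
      by_cases hin : (j : Int) ∈ PySem.List.pyRange (p * p) (r + 1) p
      · rw [if_pos hin] at hset; exact absurd hset (by simp)
      · rw [if_neg hin] at hset
        refine ⟨hset, ?_⟩
        rintro ⟨q, hq1, hq2, hq3, hq4, hq5⟩
        by_cases hqp : q = p
        · subst hqp
          exact hin ((hmem _).mpr ⟨hq4, hq5, hq3⟩)
        · exact hnex ⟨q, by omega, hq2, hq3, hq4, hq5⟩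
    · rintro ⟨haj, hnex⟩
      have hnin : ¬ ((j : Int) ∈ PySem.List.pyRange (p * p) (r + 1) p) := by
        intro hin
        rcases (hmem _).mp hin with ⟨h1, h2, h3⟩
        exact hnex ⟨p, le_refl p, h.1, h3, h1, h2⟩
      rw [if_neg hnin]
      refine ⟨haj, ?_⟩
      rintro ⟨q, hq1, hq2, hq3, hq4, hq5⟩
      exact hnex ⟨q, by omega, hq2, hq3, hq4, hq5⟩
  | case2 p a h =>
    have hr : r < p * p := by
      by_contra hc; exact h ⟨by omega, hp⟩
    constructor
    · intro haj
      refine ⟨haj, ?_⟩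
      rintro ⟨q, hq1, hq2, _⟩
      nlinarith
    · rintro ⟨haj, _⟩; exact haj

theorem foldl_boolCount (l : List Bool) (s : Int) :
    l.foldl (fun s b => if b then s + 1 else s) s = s + (l.countP (fun b => b) : Int) := by
  induction l generalizing s with
  | nil => simp
  | cons b l ih =>
    cases b <;> simp [List.foldl_cons, List.countP_cons, ih] <;> push_cast <;> ring

theorem Threediv_eq_alt (N : Int) : Threediv N = Threediv_alt N := by
  by_cases hN4 : N < 4
  · rw [Threediv, ThreedivLoop, dif_neg (by omega), Threediv_alt, if_pos hN4]
  · push_neg at hN4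
    set s : Int := (Nat.sqrt N.toNat : Int) with hs
    have hs2 : 2 ≤ s := by
      have : 2 ≤ Nat.sqrt N.toNat := Nat.le_sqrt.mpr (by omega)
      omega
    have hA : Threediv N =
        ((PySem.List.pyRange 2 (s + 1) 1).countP (fun m => isprime m) : Int) := by
      rw [Threediv, ThreedivLoop_eq N 2 0 (by omega) (by omega), zero_add]
    have hAC : (PySem.List.pyRange 2 (s + 1) 1).countP (fun m => isprime m) =
        (PySem.List.pyRange 2 (s + 1) 1).countP (fun m => decide (Nat.Prime m.toNat)) := by
      refine List.countP_congr ?_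
      intro x hx
      rcases (PySem.List.mem_pyRange_one).mp hx with ⟨hx1, hx2⟩
      rw [isprime_correct x hx1]
    have hr : isqrtLoop N 1 = s := isqrtLoop_eq N 1 (le_refl 1) (by omega)
    rw [Threediv_alt, if_neg (by omega)]
    simp only [hr]
    set a0 : Array Bool := Array.replicate (s + 1).toNat true with ha0def
    set prime := sieveLoop s 2 a0 with hprime
    have hsize : prime.size = (s + 1).toNat := by
      rw [hprime, size_sieveLoop, ha0def, Array.size_replicate]
    have hchar : ∀ j : Nat, j < (s + 1).toNat →
        (prime.getD j false = true ↔ ((2:Int) ≤ (j:Int) → Nat.Prime j)) := by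
      intro j hj
      rw [hprime, getD_sieveLoop s 2 a0 (le_refl 2) j]
      have ha0 : a0.getD j false = true := by
        rw [Array.getD_eq_getD_getElem?,
          Array.getElem?_eq_getElem (by rw [ha0def, Array.size_replicate]; exact hj)]
        simp [ha0def]
      rw [ha0]
      simp only [true_and]
      constructor
      · intro hnex h2j
        by_contra hnp
        have hnp' : ¬ Nat.Prime ((j:Int)).toNat := by simpa using hnp
        rw [prime_iff_no_sqrt_divisor _ h2j] at hnp'
        push_neg at hnp'
        rcases hnp' with ⟨d, hd1, hd2, hd3⟩
        exact hnex ⟨d, hd1, by omega, hd3, hd2, by omega⟩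
      · intro hpj
        rintro ⟨q, hq1, hq2, hq3, hq4, hq5⟩
        have h4 : (4:Int) ≤ q * q := by nlinarith
        have h2j : (2:Int) ≤ (j:Int) := by omega
        have hqj : q < (j:Int) := by nlinarith
        have : ¬ Nat.Prime ((j:Int)).toNat := not_prime_of_divisor _ q hq1 hqj hq3
        exact this (by simpa using hpj h2j)
    have hlist : prime.toList = (PySem.List.pyRange 0 (s + 1) 1).map
        (fun m => decide ((2:Int) ≤ m → Nat.Prime m.toNat)) := by
      refine List.ext_getElem ?_ ?_
      · rw [Array.length_toList, hsize, List.length_map, PySem.List.length_pyRange_one]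
        omega
      · intro i h1 h2
        have hi2 : i < (s + 1).toNat := by
          rw [Array.length_toList, hsize] at h1; exact h1
        rw [Array.getElem_toList, List.getElem_map, PySem.List.getElem_pyRange_one]
        have hgd : prime.getD i false = prime[i]'(by rw [hsize]; exact hi2) := by
          rw [Array.getD_eq_getD_getElem?,
            Array.getElem?_eq_getElem (by rw [hsize]; exact hi2)]
          rfl
        have hiff := hchar i hi2
        rw [hgd] at hiff
        simp only [zero_add]
        rcases hb : prime[i]'(by rw [hsize]; exact hi2) with _ | _
        · rw [hb] at hiff
          simp only [Bool.false_eq_true, false_iff] at hiff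
          simp only [Int.toNat_natCast]
          push_neg at hiff
          symm
          simp only [decide_eq_false_iff_not]
          intro hcon
          exact hiff.2 (hcon hiff.1)
        · rw [hb] at hiff
          simp only [true_iff] at hiff
          simp only [Int.toNat_natCast]
          symm
          simp only [decide_eq_true_eq]
          exact hiff
    rw [hlist]
    have hdrop : ((PySem.List.pyRange 0 (s + 1) 1).map
        (fun m => decide ((2:Int) ≤ m → Nat.Prime m.toNat))).drop 2 =
        (PySem.List.pyRange 2 (s + 1) 1).map
          (fun m => decide ((2:Int) ≤ m → Nat.Prime m.toNat)) := by
      rw [PySem.List.pyRange_one_append 0 2 (s + 1) (by omega) (by omega), List.map_append]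
      have hlen2 : ((PySem.List.pyRange 0 2 1).map
          (fun m => decide ((2:Int) ≤ m → Nat.Prime m.toNat))).length = 2 := by
        rw [List.length_map, PySem.List.length_pyRange_one]
        rfl
      rw [← hlen2, List.drop_left]
    rw [hdrop, foldl_boolCount, List.countP_map, hA, hAC, zero_add]
    congr 1
    refine List.countP_congr ?_
    intro x hx
    rcases (PySem.List.mem_pyRange_one).mp hx with ⟨hx1, hx2⟩
    simp [hx1]

-- ===== VERDICT (by name: the statement is the Claim_ definition above) =====
theorem Threediv_spec : Claim_equal_Threediv := by
  intro N _
  unfold Spec_Threediv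
  exact Threediv_eq_alt N
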